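-- pv_equiv track=rewrite | github.com/Gabrielcasas002/borrador_segundo_parcial | comodines.py | ocultar_palabras
-- ===== SOURCE A (Python) =====
-- def listar_palabras(palabras_asociadas: list, palabras_descubiertas: list) -> list:
--     """_summary_
--
--     Args:
--         palabras_asociadas (list): _description_
--         palabras_descubiertas (list): _description_
--
--     Returns:
--         list: _description_
--     """
--
--     palabras_total = []
--
--     for i in range(len(palabras_asociadas)):
--         palabras_total.append(palabras_asociadas[i])
--
--     for i in range(len(palabras_descubiertas)):
--         repetido = False
--
--         for j in range(len(palabras_total)):
--             if palabras_descubiertas[i] == palabras_total[j]: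
--                 repetido = True
--                 break
--
--         if repetido == False:
--             palabras_total.append(palabras_descubiertas[i])
--
--     return palabras_total
--
-- def ocultar_palabras(palabras_asociadas: list, palabras_descubiertas: list):
--     """_summary_
--
--     Args:
--         palabras_asociadas (list): _description_
--         palabras_descubiertas (list): _description_
--
--     Returns:
--         _type_: _description_
--     """
--
--     palabras_total = listar_palabras(palabras_asociadas, palabras_descubiertas)
--
--     ocultas = []
--
--     for i in range(len(palabras_total)):
--         encontrada = False
--
--         for j in range(len(palabras_descubiertas)):
--             if palabras_total[i] == palabras_descubiertas[j]:
--                 encontrada = True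
--                 break
--
--         if encontrada:
--             ocultas.append(palabras_total[i])
--         else:
--             ocultas.append("_" * len(palabras_total[i]))
--
--     return ocultas
-- ===== SOURCE B (Python) =====
-- def ocultar_palabras(palabras_asociadas: list, palabras_descubiertas: list):
--     vistas = list(palabras_asociadas)
--     resultado = []
--     for palabra in palabras_asociadas:
--         if palabra in palabras_descubiertas:
--             resultado.append(palabra)
--         else:
--             resultado.append("_" * len(palabra))
--     for descubierta in palabras_descubiertas:
--         if descubierta not in vistas:
--             vistas.append(descubierta)
--             resultado.append(descubierta)
--     return resultado
-- ===== Notes on version B (the rewrite author's own statement) =====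
-- stated objective: simpler
-- what changed: Drops the listar_palabras helper and the materialized merged list: one pass masks the asociadas words directly, a second pass appends each not-yet-seen descubierta (always revealed) to the result, tracking seen words in a running list.
import Mathlib
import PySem

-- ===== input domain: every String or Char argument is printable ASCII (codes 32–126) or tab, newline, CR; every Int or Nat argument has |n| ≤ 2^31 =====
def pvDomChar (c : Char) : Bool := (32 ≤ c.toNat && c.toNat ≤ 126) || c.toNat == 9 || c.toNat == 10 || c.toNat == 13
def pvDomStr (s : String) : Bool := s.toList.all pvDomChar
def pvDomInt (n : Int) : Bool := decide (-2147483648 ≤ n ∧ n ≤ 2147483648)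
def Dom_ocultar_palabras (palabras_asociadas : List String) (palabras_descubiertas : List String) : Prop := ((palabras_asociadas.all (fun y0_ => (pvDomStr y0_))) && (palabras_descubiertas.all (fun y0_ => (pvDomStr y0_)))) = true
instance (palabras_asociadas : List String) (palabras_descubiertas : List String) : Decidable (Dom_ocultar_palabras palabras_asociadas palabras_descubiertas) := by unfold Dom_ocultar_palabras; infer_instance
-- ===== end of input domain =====

-- B drops the listar_palabras helper and the merged list: it masks the asociadas words in one
-- pass and appends each not-yet-seen descubierta (always revealed) in a second pass (simpler).


-- ===== PORT A =====
-- A's inner linear-search loop with `break` (used twice in Source A, same shape)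
def pvSearch (xs : List String) (x : String) : Bool :=
  match xs with
  | [] => false
  | y :: ys => if x == y then true else pvSearch ys x

-- port of listar_palabras: copy loop, then dedup-append loop
def listar_palabras (palabras_asociadas : List String) (palabras_descubiertas : List String) : List String :=
  let palabras_total := palabras_asociadas.foldl (fun acc w => acc ++ [w]) []
  palabras_descubiertas.foldl (fun acc d => if pvSearch acc d then acc else acc ++ [d]) palabras_total

def ocultar_palabras (palabras_asociadas : List String) (palabras_descubiertas : List String) : List String :=
  let palabras_total := listar_palabras palabras_asociadas palabras_descubiertas
  palabras_total.foldl
    (fun ocultas w =>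
      if pvSearch palabras_descubiertas w then ocultas ++ [w]
      else ocultas ++ [String.mk (List.replicate w.toList.length '_')]) []

-- ===== PORT B =====
def ocultar_palabras_alt (palabras_asociadas : List String) (palabras_descubiertas : List String) : List String :=
  let resultado := palabras_asociadas.foldl
    (fun res w =>
      if palabras_descubiertas.contains w then res ++ [w]
      else res ++ [String.mk (List.replicate w.toList.length '_')]) []
  (palabras_descubiertas.foldl
    (fun (s : List String × List String) d =>
      if s.1.contains d then s else (s.1 ++ [d], s.2 ++ [d]))
    (palabras_asociadas, resultado)).2

-- ===== PRECONDITION & SPEC =====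
def Spec_ocultar_palabras (palabras_asociadas : List String) (palabras_descubiertas : List String) (out : List String) : Prop := out = ocultar_palabras_alt palabras_asociadas palabras_descubiertas
instance (palabras_asociadas : List String) (palabras_descubiertas : List String) (out : List String) : Decidable (Spec_ocultar_palabras palabras_asociadas palabras_descubiertas out) := by unfold Spec_ocultar_palabras; infer_instance

-- ===== CLAIM (what is proved, stated in full; the proofs are below) =====
def Claim_equal_ocultar_palabras : Prop := ∀ (palabras_asociadas : List String) (palabras_descubiertas : List String), Dom_ocultar_palabras palabras_asociadas palabras_descubiertas → Spec_ocultar_palabras palabras_asociadas palabras_descubiertas (ocultar_palabras palabras_asociadas palabras_descubiertas)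

-- ===== LEMMAS AND PROOFS =====

theorem pvSearch_eq_contains (xs : List String) (x : String) : pvSearch xs x = xs.contains x := by
  induction xs with
  | nil => rfl
  | cons y ys ih =>
    simp only [pvSearch, List.contains_cons]
    by_cases h : x == y <;> simp [h, ih]

theorem foldl_copy (xs init : List String) :
    xs.foldl (fun acc w => acc ++ [w]) init = init ++ xs := by
  induction xs generalizing init with
  | nil => simp
  | cons y ys ih => simp [List.foldl, ih]

-- the masking of one word: revealed iff found among pd
def pvMaskWord (pd : List String) (w : String) : String :=
  if pd.contains w then w else String.mk (List.replicate w.toList.length '_')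

-- A's masking loop produces the pointwise masked list
theorem foldl_mask (pd xs init : List String) :
    xs.foldl (fun acc w =>
      if pvSearch pd w then acc ++ [w]
      else acc ++ [String.mk (List.replicate w.toList.length '_')]) init
      = init ++ xs.map (pvMaskWord pd) := by
  induction xs generalizing init with
  | nil => simp
  | cons y ys ih =>
    rw [List.foldl_cons, ih]
    by_cases h : y ∈ pd <;> simp [pvSearch_eq_contains, pvMaskWord, h]

-- B's masking loop produces the same pointwise masked list
theorem foldl_mask_alt (pd xs init : List String) :
    xs.foldl (fun acc w =>
      if pd.contains w then acc ++ [w]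
      else acc ++ [String.mk (List.replicate w.toList.length '_')]) init
      = init ++ xs.map (pvMaskWord pd) := by
  induction xs generalizing init with
  | nil => simp
  | cons y ys ih =>
    rw [List.foldl_cons, ih]
    by_cases h : y ∈ pd <;> simp [pvMaskWord, h]

-- key invariant: B's paired fold keeps its second component equal to the masked image of its
-- first, provided every word still to be processed occurs in PD (so it is revealed when added);
-- the first component evolves exactly like A's dedup-append fold in listar_palabras.
theorem key (PD : List String) (pd : List String) (hsub : ∀ d ∈ pd, d ∈ PD) :
    ∀ (v : List String),
      (pd.foldl (fun (s : List String × List String) d =>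
          if s.1.contains d then s else (s.1 ++ [d], s.2 ++ [d]))
        (v, v.map (pvMaskWord PD))).2
      = (pd.foldl (fun acc d => if pvSearch acc d then acc else acc ++ [d]) v).map (pvMaskWord PD) := by
  induction pd with
  | nil => intro v; rfl
  | cons d ds ih =>
    intro v
    have hd : d ∈ PD := hsub d (List.mem_cons_self ..)
    have hsub' : ∀ x ∈ ds, x ∈ PD := fun x hx => hsub x (List.mem_cons_of_mem _ hx)
    rw [List.foldl_cons, List.foldl_cons]
    by_cases h : d ∈ v
    · have h1 : (v, v.map (pvMaskWord PD)).1.contains d = true := by simpa using h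
      have h2 : pvSearch v d = true := by simpa [pvSearch_eq_contains] using h
      rw [if_pos h1, if_pos h2]
      exact ih hsub' v
    · have h1 : ¬ (v, v.map (pvMaskWord PD)).1.contains d = true := by simpa using h
      have h2 : ¬ pvSearch v d = true := by simpa [pvSearch_eq_contains] using h
      rw [if_neg h1, if_neg h2]
      have hm : (v ++ [d]).map (pvMaskWord PD) = v.map (pvMaskWord PD) ++ [d] := by
        simp [pvMaskWord, hd]
      have := ih hsub' (v ++ [d])
      rw [hm] at this
      exact this

-- ===== VERDICT (by name: the statement is the Claim_ definition above) =====
theorem ocultar_palabras_spec : Claim_equal_ocultar_palabras := by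
  intro pa pd _
  show ocultar_palabras pa pd = ocultar_palabras_alt pa pd
  unfold ocultar_palabras ocultar_palabras_alt listar_palabras
  rw [foldl_copy, foldl_mask, foldl_mask_alt, List.nil_append, List.nil_append, List.nil_append]
  exact (key pd pd (fun d hd => hd) pa).symm
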